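-- pv_equiv track=rewrite | github.com/Ma-Lab-Berkeley/deep-representation-learning-book | website/latex_to_html/latex_to_html_converter.py | _strip_tex_comments
-- ===== SOURCE A (Python) =====
-- def _strip_tex_comments(text: str) -> str:
--     try:
--         # Remove LaTeX comments: '%' to end-of-line (ignore escaped \%)
--         lines = []
--         for line in text.splitlines():
--             # crude but effective: split on unescaped %
--             pos = 0
--             cut = len(line)
--             while True:
--                 idx = line.find('%', pos)
--                 if idx == -1:
--                     break
--                 if idx > 0 and line[idx - 1] == '\\':
--                     pos = idx + 1
--                     continue
--                 cut = idx
--                 break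
--             lines.append(line[:cut])
--         return "\n".join(lines)
--     except Exception:
--         return text
-- ===== SOURCE B (Python) =====
-- def _strip_tex_comments(text: str) -> str:
--     def _cut(line):
--         kept = []
--         prev = ''
--         for ch in line:
--             if ch == '%' and prev != '\\':
--                 break
--             kept.append(ch)
--             prev = ch
--         return ''.join(kept)
--     return "\n".join(_cut(line) for line in text.splitlines())
-- ===== Notes on version B (the rewrite author's own statement) =====
-- stated objective: simpler
-- what changed: Replaced the repeated find/escape-backtracking while-loop plus slicing with a single left-to-right character scan per line that tracks the previous character and stops at the first unescaped percent sign.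
import Mathlib
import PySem

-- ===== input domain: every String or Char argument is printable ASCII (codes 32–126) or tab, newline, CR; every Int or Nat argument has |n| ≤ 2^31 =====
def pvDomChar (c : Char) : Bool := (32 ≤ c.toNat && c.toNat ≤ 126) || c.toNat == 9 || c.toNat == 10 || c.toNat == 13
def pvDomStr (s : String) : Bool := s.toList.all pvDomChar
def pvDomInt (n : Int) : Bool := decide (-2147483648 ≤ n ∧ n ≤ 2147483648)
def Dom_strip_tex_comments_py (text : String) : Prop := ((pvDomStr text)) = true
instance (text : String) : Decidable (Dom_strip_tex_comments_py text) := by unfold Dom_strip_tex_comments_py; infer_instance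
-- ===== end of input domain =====

-- B replaces A's repeated find('%',pos)/escape-backtracking loop with one character scan
-- per line tracking the previous character (objective: simpler). Return value only; A's
-- try/except never fires on str input.

-- ===== PORT A =====
-- the inner 'while True' of A: returns the final 'cut'; fuel bounds the loop (pos strictly
-- increases each iteration, so fuel = len(line)+1 is never exhausted)
def aCut (line : List Char) (pos : Nat) (fuel : Nat) : Nat :=
  match fuel with
  | 0 => line.length
  | fuel + 1 =>
    let idx := PySem.Chars.findFrom line ['%'] (pos : Int) none
    if idx = -1 then line.length
    else if 0 < idx ∧ PySem.List.pyGet? line (idx - 1) = some '\\' then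
      aCut line (idx.toNat + 1) fuel
    else idx.toNat

def strip_tex_comments_py (text : String) : String :=
  let lines := (PySem.Str.splitlines text).foldl
    (fun acc line =>
      acc ++ [PySem.Str.slice line none (some ((aCut line.toList 0 (line.toList.length + 1) : Nat) : Int))]) []
  PySem.Str.join "\n" lines

-- ===== PORT B =====
-- the inner 'for ch in line' of Source B: kept = accumulator, prev = previous character ([] = Python '')
def bScan (kept : List Char) (prev : List Char) (l : List Char) : List Char :=
  match l with
  | [] => kept
  | c :: rest => if c = '%' ∧ prev ≠ ['\\'] then kept else bScan (kept ++ [c]) [c] rest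

def strip_tex_comments_py_alt (text : String) : String :=
  PySem.Str.join "\n"
    ((PySem.Str.splitlines text).map (fun line => String.ofList (bScan [] [] line.toList)))

-- ===== PRECONDITION & SPEC =====
def Spec_strip_tex_comments_py (text : String) (out : String) : Prop := out = strip_tex_comments_py_alt text
instance (text : String) (out : String) : Decidable (Spec_strip_tex_comments_py text out) := by unfold Spec_strip_tex_comments_py; infer_instance

-- ===== CLAIM (what is proved, stated in full; the proofs are below) =====
def Claim_equal_strip_tex_comments_py : Prop := ∀ (text : String), Dom_strip_tex_comments_py text → Spec_strip_tex_comments_py text (strip_tex_comments_py text)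

-- ===== LEMMAS AND PROOFS =====

-- accumulator-free form of bScan
def scanF (prev : List Char) (l : List Char) : List Char :=
  match l with
  | [] => []
  | c :: rest => if c = '%' ∧ prev ≠ ['\\'] then [] else c :: scanF [c] rest

lemma bScan_eq_scanF (l : List Char) : ∀ kept prev, bScan kept prev l = kept ++ scanF prev l := by
  induction l with
  | nil => simp [bScan, scanF]
  | cons c rest ih =>
    intro kept prev
    simp only [bScan, scanF]
    split
    · simp
    · rw [ih]; simp

-- previous-character string: Python's 'prev' after having consumed pos characters of l
def prevOf (l : List Char) (pos : Nat) : List Char :=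
  if pos = 0 then [] else (l.drop (pos - 1)).take 1

def lastP (prev : List Char) (m : List Char) : List Char :=
  match m.getLast? with
  | none => prev
  | some x => [x]

lemma scanF_walk (m : List Char) (h : '%' ∉ m) : ∀ prev rest,
    scanF prev (m ++ rest) = m ++ scanF (lastP prev m) rest := by
  induction m with
  | nil => intro prev rest; simp [lastP]
  | cons c m ih =>
    intro prev rest
    have hc : c ≠ '%' := by intro hc; exact h (by simp [hc])
    have hm : '%' ∉ m := fun hx => h (by simp [hx])
    simp only [List.cons_append, scanF]
    rw [if_neg (by intro hh; exact hc hh.1), ih hm]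
    congr 2
    simp only [lastP, List.getLast?_cons]
    cases hg : m.getLast? with
    | none => simp_all [List.getLast?_eq_none_iff]
    | some x => simp

lemma scanF_no_pct (m : List Char) (h : '%' ∉ m) (prev : List Char) : scanF prev m = m := by
  have := scanF_walk m h prev []
  simpa [scanF] using this

lemma singleton_prefix_iff (a : Char) (m : List Char) : [a] <+: m ↔ m.head? = some a := by
  cases m with
  | nil => simp
  | cons c rest =>
    constructor
    · rintro ⟨t, ht⟩
      simp only [List.singleton_append] at ht
      cases ht; simp
    · intro h
      simp only [List.head?_cons, Option.some.injEq] at h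
      exact ⟨rest, by simp [h]⟩

lemma prevOf_getElem (l : List Char) (pos : Nat) (h0 : 0 < pos) (h : pos - 1 < l.length) :
    prevOf l pos = [l[pos - 1]] := by
  unfold prevOf
  rw [if_neg (by omega), List.take_one, List.head?_drop, List.getElem?_eq_getElem h]
  rfl

-- the heart: A's cut-search equals B's scan on the remaining suffix
lemma aCut_scanF (l : List Char) : ∀ fuel pos, pos ≤ l.length → l.length - pos < fuel →
    l.take (aCut l pos fuel) = l.take pos ++ scanF (prevOf l pos) (l.drop pos) := by
  intro fuel
  induction fuel with
  | zero => intro pos h1 h2; omega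
  | succ fuel ih =>
    intro pos hpos hfuel
    simp only [aCut]
    have hcast : PySem.Chars.findFrom l ['%'] (pos : Int) none =
        if PySem.Chars.find (l.drop pos) ['%'] = -1 then (-1 : Int)
        else (pos : Int) + PySem.Chars.find (l.drop pos) ['%'] :=
      PySem.Chars.findFrom_natCast l ['%'] pos hpos
    by_cases hfind : PySem.Chars.find (l.drop pos) ['%'] = -1
    · -- no '%' at or after pos
      rw [hcast, if_pos hfind, if_pos rfl]
      have hni : ¬ ['%'] <:+: l.drop pos := (PySem.Chars.find_eq_neg_one_iff _ _).mp hfind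
      have hnm : '%' ∉ l.drop pos := by
        intro hm
        obtain ⟨s, t, hsplit⟩ := List.append_of_mem hm
        exact hni ⟨s, t, by simp [hsplit]⟩
      rw [scanF_no_pct _ hnm, List.take_length]
      exact (List.take_append_drop pos l).symm
    · -- first '%' at position pos + j
      have hinf : ['%'] <:+: l.drop pos := (PySem.Chars.find_ne_neg_one_iff _ _).mp hfind
      have hnonneg : 0 ≤ PySem.Chars.find (l.drop pos) ['%'] :=
        (PySem.Chars.find_nonneg_iff _ _).mpr hinf
      set j : Nat := (PySem.Chars.find (l.drop pos) ['%']).toNat with hj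
      obtain ⟨hpref, hmin⟩ := PySem.Chars.find_spec (s := l.drop pos) (sub := ['%']) hnonneg
      have hhead : (l.drop (pos + j)).head? = some '%' := by
        have h1 := (singleton_prefix_iff _ _).mp hpref
        rw [List.drop_drop] at h1
        exact h1
      have hjlt : pos + j < l.length := by
        by_contra hge
        rw [List.drop_eq_nil_of_le (by omega)] at hhead
        simp at hhead
      have hElem : l[pos + j]'hjlt = '%' := by
        have h2 := hhead
        rw [List.head?_drop, List.getElem?_eq_getElem hjlt] at h2
        simpa using h2
      -- no '%' in l[pos..pos+j)
      have hm1 : '%' ∉ (l.drop pos).take j := by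
        intro hm
        obtain ⟨i, hi, hgi⟩ := List.getElem_of_mem hm
        have hilt : i < j := by
          have := List.length_take_le j (l.drop pos); omega
        refine hmin i hilt ?_
        rw [singleton_prefix_iff]
        rw [List.getElem_take] at hgi
        rw [List.drop_eq_getElem_cons (by simp; omega : i < (l.drop pos).length)]
        simp [hgi]
      -- decompose drop pos = segment ++ '%' :: rest
      have hdec : l.drop pos = (l.drop pos).take j ++ '%' :: l.drop (pos + j + 1) := by
        conv_lhs => rw [← List.take_append_drop j (l.drop pos)]
        congr 1
        rw [List.drop_drop, List.drop_eq_getElem_cons hjlt, hElem]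
      have hidx : PySem.Chars.findFrom l ['%'] (pos : Int) none = ((pos + j : Nat) : Int) := by
        rw [hcast, if_neg hfind]
        push_cast
        omega
      rw [hidx]
      rw [if_neg (by omega : ¬ (((pos + j : Nat) : Int) = -1))]
      have htake1 : l.take (pos + j) = l.take pos ++ (l.drop pos).take j := List.take_add ..
      -- lastP of the walked segment
      have hlastP : ∀ prev, lastP prev ((l.drop pos).take j) =
          if j = 0 then prev else [l[pos + j - 1]'(by omega)] := by
        intro prev
        by_cases hj0 : j = 0
        · simp [hj0, lastP]
        · rw [if_neg hj0]
          have hlen : ((l.drop pos).take j).length = j := by simp; omega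
          simp only [lastP]
          rw [List.getLast?_eq_getElem?, hlen]
          rw [List.getElem?_eq_getElem (by omega : j - 1 < ((l.drop pos).take j).length)]
          simp only [List.getElem_take, List.getElem_drop]
          congr 2
          omega
      have htn : ((pos + j : Nat) : Int).toNat = pos + j := by omega
      by_cases hesc : 0 < ((pos + j : Nat) : Int) ∧ PySem.List.pyGet? l (((pos + j : Nat) : Int) - 1) = some '\\'
      · -- escaped: A recurses past this '%', B's scan keeps it and continues
        rw [if_pos hesc, htn]
        obtain ⟨hgt, hget⟩ := hesc
        have hgetN : l[pos + j - 1]'(by omega) = '\\' := by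
          have he : (((pos + j : Nat) : Int) - 1) = ((pos + j - 1 : Nat) : Int) := by omega
          rw [he, PySem.List.pyGet?_natCast, List.getElem?_eq_getElem (by omega)] at hget
          simpa using hget
        rw [ih (pos + j + 1) (by omega) (by omega)]
        conv_rhs => rw [hdec]
        rw [scanF_walk _ hm1, hlastP]
        have hprevO : prevOf l (pos + j + 1) = ['%'] := by
          rw [prevOf_getElem l (pos + j + 1) (by omega) (by simpa using hjlt)]
          simp [hElem]
        rw [hprevO]
        have hprevVal : (if j = 0 then prevOf l pos else [l[pos + j - 1]'(by omega)]) = ['\\'] := by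
          by_cases hj0 : j = 0
          · rw [if_pos hj0, prevOf_getElem l pos (by omega) (by omega)]
            congr 1
            rw [← hgetN]
            congr 1
            omega
          · rw [if_neg hj0, hgetN]
        rw [hprevVal]
        have hstep : scanF ['\\'] ('%' :: l.drop (pos + j + 1)) =
            '%' :: scanF ['%'] (l.drop (pos + j + 1)) := by
          simp [scanF]
        rw [hstep]
        have htake2 : l.take (pos + j + 1) = l.take pos ++ ((l.drop pos).take j ++ ['%']) := by
          have h1 : l.take (pos + j + 1) = l.take (pos + j) ++ (l.drop (pos + j)).take 1 :=
            List.take_add ..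
          rw [h1, htake1, List.drop_eq_getElem_cons hjlt, hElem]
          simp
        rw [htake2]
        simp
      · -- not escaped: A cuts here, B's scan stops here
        rw [if_neg hesc, htn]
        conv_rhs => rw [hdec]
        rw [scanF_walk _ hm1, hlastP]
        have hprev_ne : (if j = 0 then prevOf l pos else [l[pos + j - 1]'(by omega)]) ≠ ['\\'] := by
          by_cases hpj0 : pos + j = 0
          · rw [if_pos (by omega)]
            simp [prevOf, (by omega : pos = 0)]
          · have hget_ne : ¬ PySem.List.pyGet? l (((pos + j : Nat) : Int) - 1) = some '\\' := by
              intro hc; exact hesc ⟨by omega, hc⟩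
            have hne : l[pos + j - 1]'(by omega) ≠ '\\' := by
              intro hc
              apply hget_ne
              have he : (((pos + j : Nat) : Int) - 1) = ((pos + j - 1 : Nat) : Int) := by omega
              rw [he, PySem.List.pyGet?_natCast, List.getElem?_eq_getElem (by omega)]
              simp [hc]
            by_cases hj0 : j = 0
            · rw [if_pos hj0, prevOf_getElem l pos (by omega) (by omega)]
              intro hc
              simp only [List.cons.injEq, and_true] at hc
              apply hne
              rw [← hc]
              congr 1
              omega
            · rw [if_neg hj0]
              intro hc
              simp only [List.cons.injEq, and_true] at hc
              exact hne hc
        have hstop : scanF (if j = 0 then prevOf l pos else [l[pos + j - 1]'(by omega)])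
            ('%' :: l.drop (pos + j + 1)) = [] := by
          simp [scanF, hprev_ne]
        rw [hstop, htake1]
        simp

-- per-line agreement: A's slice at the computed cut = B's scanned prefix
lemma line_eq (line : String) :
    PySem.Str.slice line none (some ((aCut line.toList 0 (line.toList.length + 1) : Nat) : Int)) =
    String.ofList (bScan [] [] line.toList) := by
  apply String.toList_inj.mp
  have hA : (PySem.Str.slice line none
      (some ((aCut line.toList 0 (line.toList.length + 1) : Nat) : Int))).toList =
      line.toList.take (aCut line.toList 0 (line.toList.length + 1)) := by
    rw [PySem.Str.toList_slice, PySem.Chars.slice_eq_listSlice, PySem.List.slice_to_natCast]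
  rw [hA]
  have h := aCut_scanF line.toList (line.toList.length + 1) 0 (by omega) (by omega)
  simp only [List.take_zero, List.drop_zero, List.nil_append] at h
  rw [h, bScan_eq_scanF]
  simp [prevOf]

-- A's append-to-list loop is a map
lemma foldl_append_map {α β : Type} (f : α → β) (xs : List α) (acc : List β) :
    xs.foldl (fun a x => a ++ [f x]) acc = acc ++ xs.map f := by
  induction xs generalizing acc with
  | nil => simp
  | cons x xs ih => simp [ih]

-- ===== VERDICT (by name: the statement is the Claim_ definition above) =====
theorem strip_tex_comments_py_spec : Claim_equal_strip_tex_comments_py := by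
  intro text _
  unfold Spec_strip_tex_comments_py strip_tex_comments_py strip_tex_comments_py_alt
  rw [foldl_append_map]
  simp only [List.nil_append]
  congr 1
  exact List.map_congr_left (fun line _ => line_eq line)
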